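-- pv_equiv track=rewrite | github.com/MrBrantCode/unitest_baseline | mut_generate/mist_train_taco/taco_16410/solution.py | check_gray_code_property
-- ===== SOURCE A (Python) =====
-- def check_gray_code_property(n, A):
--     if n >= 68:
--         return 'Yes'
--
--     dic = {}
--     flag = 0
--
--     for i in range(n - 1):
--         for j in range(i + 1, n):
--             xor = A[i] ^ A[j]
--             if xor in dic:
--                 for pair in dic[xor]:
--                     (x, y) = pair
--                     if x != i and y != j and x != j and y != i:
--                         flag = 1
--                         break
--                 dic[xor].append((i, j))
--             else:
--                 dic[xor] = [(i, j)]
--             if flag == 1: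
--                 break
--         if flag == 1:
--             break
--
--     return 'Yes' if flag == 1 else 'No'
-- ===== SOURCE B (Python) =====
-- def check_gray_code_property(n, A):
--     if n >= 68:
--         return 'Yes'
--     # build the flat list of index pairs once, then brute-force compare each
--     # pair against every earlier pair directly (no dict, no flag)
--     pairs = [(i, j) for i in range(n - 1) for j in range(i + 1, n)]
--     for t, (i, j) in enumerate(pairs):
--         for (x, y) in pairs[:t]:
--             if x != i and y != j and x != j and y != i and A[x] ^ A[y] == A[i] ^ A[j]:
--                 return 'Yes'
--     return 'No'
-- ===== Notes on version B (the rewrite author's own statement) =====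
-- stated objective: simpler
-- what changed: Replaced the xor-keyed dictionary of pair groups plus flag/break machinery by a plain quadratic scan over a flat list of previously seen index pairs, testing xor equality directly and returning early.
import Mathlib
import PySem

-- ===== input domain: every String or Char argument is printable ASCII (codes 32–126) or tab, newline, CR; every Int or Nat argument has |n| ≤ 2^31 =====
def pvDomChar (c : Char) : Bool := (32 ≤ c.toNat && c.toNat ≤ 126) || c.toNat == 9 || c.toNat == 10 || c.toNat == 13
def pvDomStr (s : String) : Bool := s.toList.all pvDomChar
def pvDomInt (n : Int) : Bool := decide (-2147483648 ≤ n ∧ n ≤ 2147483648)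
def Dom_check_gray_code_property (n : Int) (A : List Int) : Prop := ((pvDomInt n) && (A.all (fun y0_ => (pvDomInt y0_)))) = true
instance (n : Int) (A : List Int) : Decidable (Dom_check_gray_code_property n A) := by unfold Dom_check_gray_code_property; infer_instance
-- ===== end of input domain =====

-- B replaces A's xor-keyed dict of pair groups + flag/break machinery by a flat
-- pair list scanned quadratically with the xor test written out (objective: simpler).

-- shared transliterations of the Python expressions 'A[x] ^ A[y]' and
-- 'x != i and y != j and x != j and y != i' (both sources contain them verbatim)
def pvXorAt (A : List Int) (p : Int × Int) : Int :=
  PySem.Int.bxor (PySem.List.pyGetD A p.1 0) (PySem.List.pyGetD A p.2 0)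

def pvDisj (p q : Int × Int) : Bool :=
  p.1 != q.1 && p.2 != q.2 && p.1 != q.2 && p.2 != q.1

-- ===== PORT A =====
-- inner 'for j in range(i+1, n)' loop: returns the dict and the flag; a set flag breaks
def pvInnerA (A : List Int) (i : Int) :
    List Int → PySem.Dict Int (List (Int × Int)) → PySem.Dict Int (List (Int × Int)) × Bool
  | [], d => (d, false)
  | j :: rest, d =>
      let x := pvXorAt A (i, j)
      match d.get? x with
      | some lst =>
          let f := lst.any (fun p => pvDisj p (i, j))
          let d' := d.insert x (lst ++ [(i, j)])
          if f then (d', true) else pvInnerA A i rest d'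
      | none => pvInnerA A i rest (d.insert x [(i, j)])

-- outer 'for i in range(n-1)' loop with its 'if flag == 1: break'
def pvOuterA (n : Int) (A : List Int) :
    List Int → PySem.Dict Int (List (Int × Int)) → Bool
  | [], _ => false
  | i :: rest, d =>
      let r := pvInnerA A i (PySem.List.pyRange (i + 1) n 1) d
      if r.2 then true else pvOuterA n A rest r.1

def check_gray_code_property (n : Int) (A : List Int) : String :=
  if 68 ≤ n then "Yes"
  else if pvOuterA n A (PySem.List.pyRange 0 (n - 1) 1) PySem.Dict.empty then "Yes" else "No"

-- ===== PORT B =====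
-- 'pairs = [(i, j) for i in range(n-1) for j in range(i+1, n)]'
def pvPairs (n : Int) : List (Int × Int) :=
  (PySem.List.pyRange 0 (n - 1) 1).flatMap (fun i =>
    (PySem.List.pyRange (i + 1) n 1).map (fun j => (i, j)))

-- 'for t, (i,j) in enumerate(pairs): for (x,y) in pairs[:t]: …' — the processed
-- prefix pairs[:t] is carried as 'seen'
def pvScanB (A : List Int) : List (Int × Int) → List (Int × Int) → Bool
  | _, [] => false
  | seen, q :: rest =>
      if seen.any (fun p => pvDisj p q && (pvXorAt A p == pvXorAt A q)) then true
      else pvScanB A (seen ++ [q]) rest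

def check_gray_code_property_alt (n : Int) (A : List Int) : String :=
  if 68 ≤ n then "Yes"
  else if pvScanB A [] (pvPairs n) then "Yes" else "No"

-- ===== PRECONDITION & SPEC =====
-- Pre_ excludes exactly the inputs where Python A raises IndexError: 2 ≤ n < 68 with n > len(A)
def Pre_check_gray_code_property (n : Int) (A : List Int) : Prop :=
  68 ≤ n ∨ n ≤ 1 ∨ n ≤ (A.length : Int)
instance (n : Int) (A : List Int) : Decidable (Pre_check_gray_code_property n A) := by
  unfold Pre_check_gray_code_property; infer_instance

def pvWitness_check_gray_code_property : Int × List Int := (4, [1, 2, 3, 4])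

def Spec_check_gray_code_property (n : Int) (A : List Int) (out : String) : Prop := out = check_gray_code_property_alt n A
instance (n : Int) (A : List Int) (out : String) : Decidable (Spec_check_gray_code_property n A out) := by unfold Spec_check_gray_code_property; infer_instance

-- ===== CLAIM (what is proved, stated in full; the proofs are below) =====
def Claim_equal_check_gray_code_property : Prop := ∀ (n : Int) (A : List Int), Dom_check_gray_code_property n A → Pre_check_gray_code_property n A → Spec_check_gray_code_property n A (check_gray_code_property n A)

-- ===== LEMMAS AND PROOFS =====

-- invariant: the dict groups the processed pairs by xor value, in order
def pvInv (A : List Int) (d : PySem.Dict Int (List (Int × Int))) (seen : List (Int × Int)) : Prop :=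
  ∀ v : Int, d.get? v =
    (if seen.filter (fun p => pvXorAt A p == v) = [] then none
     else some (seen.filter (fun p => pvXorAt A p == v)))

theorem pv_any_filter (l : List (Int × Int)) (f g : Int × Int → Bool) :
    (l.filter f).any g = l.any (fun p => g p && f p) := by
  induction l with
  | nil => rfl
  | cons a t ih =>
      by_cases h : f a = true <;> simp [h, ih, Bool.and_comm]

theorem pv_scan_append (A : List Int) (L1 L2 seen : List (Int × Int)) :
    pvScanB A seen (L1 ++ L2) = (pvScanB A seen L1 || pvScanB A (seen ++ L1) L2) := by
  induction L1 generalizing seen with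
  | nil => simp [pvScanB]
  | cons q r ih =>
      simp only [List.cons_append, pvScanB]
      by_cases h : seen.any (fun p => pvDisj p q && (pvXorAt A p == pvXorAt A q)) = true
      · simp [h]
      · simp [h, ih, List.append_assoc]

theorem pv_inv_step (A : List Int) (d : PySem.Dict Int (List (Int × Int)))
    (seen : List (Int × Int)) (q : Int × Int) (h : pvInv A d seen)
    (lst : List (Int × Int))
    (hl : lst = seen.filter (fun p => pvXorAt A p == pvXorAt A q)) :
    pvInv A (d.insert (pvXorAt A q) (lst ++ [q])) (seen ++ [q]) := by
  intro v
  by_cases hv : v = pvXorAt A q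
  · subst hv
    rw [PySem.Dict.get?_insert_self]
    simp [List.filter_append, hl]
  · rw [PySem.Dict.get?_insert_of_ne _ _ hv, h v]
    have : (pvXorAt A q == v) = false := by
      simp [BEq.beq]; omega
    have hfq : List.filter (fun p => pvXorAt A p == v) (seen ++ [q])
        = List.filter (fun p => pvXorAt A p == v) seen := by
      simp [List.filter_append, this]
    rw [hfq]

theorem pv_inner_eq (A : List Int) (i : Int) (js : List Int)
    (d : PySem.Dict Int (List (Int × Int))) (seen : List (Int × Int))
    (h : pvInv A d seen) :
    (pvInnerA A i js d).2 = pvScanB A seen (js.map (fun j => (i, j))) ∧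
    ((pvInnerA A i js d).2 = false →
      pvInv A (pvInnerA A i js d).1 (seen ++ js.map (fun j => (i, j)))) := by
  induction js generalizing d seen with
  | nil => simpa [pvInnerA, pvScanB] using h
  | cons j rest ih =>
      have hcond : (seen.any (fun p => pvDisj p (i, j) && (pvXorAt A p == pvXorAt A (i, j))))
          = (seen.filter (fun p => pvXorAt A p == pvXorAt A (i, j))).any
              (fun p => pvDisj p (i, j)) := by
        rw [pv_any_filter]
      by_cases he : seen.filter (fun p => pvXorAt A p == pvXorAt A (i, j)) = []
      · -- dict has no entry for this xor: no hit possible at this step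
        have hget := h (pvXorAt A (i, j))
        rw [if_pos he] at hget
        have hfalse : (seen.any (fun p => pvDisj p (i, j) && (pvXorAt A p == pvXorAt A (i, j)))) = false := by
          rw [hcond, he]; rfl
        have hinv' : pvInv A (d.insert (pvXorAt A (i, j)) [(i, j)]) (seen ++ [(i, j)]) := by
          have := pv_inv_step A d seen (i, j) h [] he.symm
          simpa using this
        have := ih _ _ hinv'
        simp only [pvInnerA, hget, pvScanB, List.map_cons, hfalse]
        simpa [List.append_assoc] using this
      · -- dict entry exists: A scans the group, B scans all of seen
        have hget := h (pvXorAt A (i, j))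
        rw [if_neg he] at hget
        by_cases hf : (seen.filter (fun p => pvXorAt A p == pvXorAt A (i, j))).any
            (fun p => pvDisj p (i, j)) = true
        · constructor
          · simp [pvInnerA, hget, hf, pvScanB, hcond]
          · intro hfl
            exfalso
            simp [pvInnerA, hget, hf] at hfl
        · have hinv' : pvInv A
              (d.insert (pvXorAt A (i, j))
                ((seen.filter (fun p => pvXorAt A p == pvXorAt A (i, j))) ++ [(i, j)]))
              (seen ++ [(i, j)]) :=
            pv_inv_step A d seen (i, j) h _ rfl
          have := ih _ _ hinv'
          simp only [pvInnerA, hget, pvScanB, List.map_cons, hcond,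
            Bool.not_eq_true] at *
          simp only [hf]
          simpa [List.append_assoc, hf] using this

theorem pv_outer_eq (n : Int) (A : List Int) (is : List Int)
    (d : PySem.Dict Int (List (Int × Int))) (seen : List (Int × Int))
    (h : pvInv A d seen) :
    pvOuterA n A is d =
      pvScanB A seen (is.flatMap (fun i =>
        (PySem.List.pyRange (i + 1) n 1).map (fun j => (i, j)))) := by
  induction is generalizing d seen with
  | nil => simp [pvOuterA, pvScanB]
  | cons i rest ih =>
      obtain ⟨h1, h2⟩ := pv_inner_eq A i (PySem.List.pyRange (i + 1) n 1) d seen h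
      simp only [pvOuterA, List.flatMap_cons, pv_scan_append]
      by_cases hr : (pvInnerA A i (PySem.List.pyRange (i + 1) n 1) d).2 = true
      · simp [hr, ← h1]
      · have hr' := Bool.not_eq_true _ |>.mp hr
        rw [ih _ _ (h2 hr')]
        simp [hr', ← h1]

theorem pv_inv_empty (A : List Int) : pvInv A PySem.Dict.empty [] := by
  intro v
  simp [PySem.Dict.get?, PySem.Dict.empty]

-- ===== VERDICT (by name: the statement is the Claim_ definition above) =====
theorem check_gray_code_property_spec : Claim_equal_check_gray_code_property := by
  intro n A _ _
  unfold Spec_check_gray_code_property check_gray_code_property check_gray_code_property_alt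
  by_cases h : 68 ≤ n
  · simp [h]
  · rw [pv_outer_eq n A _ _ _ (pv_inv_empty A)]
    simp [h, pvPairs]
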